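-- pv_equiv track=rewrite | github.com/rebuilder945/FL_research | ast_research/python_code_5.23/lastterm_page10/success_code/唐千越-3492-2023-06-05_15_49_55.py | f
-- ===== SOURCE A (Python) =====
-- def f(x):
--     a = {}
--     for i in x:
--         if i in a:
--             a[i] += 1
--         else:
--             a[i] = 1
--     for i in a:
--         if a[i] == 1:
--             return i
--             break
--     return None
-- ===== SOURCE B (Python) =====
-- def f(x):
--     seen = []
--     rest = x
--     while rest:
--         i = rest[0]
--         rest = rest[1:]
--         if i not in seen and i not in rest:
--             return i
--         seen.append(i)
--     return None
-- ===== Notes on version B (the rewrite author's own statement) =====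
-- stated objective: alternative
-- what changed: Removed the counting dict entirely: a single destructuring loop carries a 'seen' prefix and returns the first element that occurs neither in the seen prefix nor in the remaining tail, replacing count-then-scan with pure membership tests.
import Mathlib
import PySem

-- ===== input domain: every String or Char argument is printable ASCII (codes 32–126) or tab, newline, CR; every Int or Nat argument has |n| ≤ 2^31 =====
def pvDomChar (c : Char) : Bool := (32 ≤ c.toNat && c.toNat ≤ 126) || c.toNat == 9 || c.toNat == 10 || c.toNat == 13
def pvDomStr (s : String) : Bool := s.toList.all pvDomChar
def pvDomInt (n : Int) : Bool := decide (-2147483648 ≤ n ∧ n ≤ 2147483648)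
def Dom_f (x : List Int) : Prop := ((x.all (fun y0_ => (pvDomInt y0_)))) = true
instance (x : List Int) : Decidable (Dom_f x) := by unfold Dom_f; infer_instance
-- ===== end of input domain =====

-- B removes A's count dict: one destructuring loop with a 'seen' accumulator returns the
-- first element occurring in neither the seen prefix nor the remaining tail (membership,
-- no counting); alternative decomposition, same return value.

-- ===== PORT A =====
-- first loop of A: build the count dict
def fCount (x : List Int) : PySem.Dict Int Int :=
  x.foldl (fun a i =>
    if a.contains i then a.insert i (a.getD i 0 + 1) else a.insert i 1)
    PySem.Dict.empty

-- second loop of A: 'for i in a: if a[i] == 1: return i' then 'return None'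
def fScan (a : PySem.Dict Int Int) : List Int → Option Int
  | [] => none
  | k :: ks => if a.getD k 0 == 1 then some k else fScan a ks

def f (x : List Int) : Option Int :=
  let a := fCount x
  fScan a a.keys

-- ===== PORT B =====
-- Source B's while-loop: 'seen' accumulator, pop the head of 'rest', membership tests
def fGo (seen : List Int) : List Int → Option Int
  | [] => none
  | i :: rest =>
      if i ∉ seen ∧ i ∉ rest then some i
      else fGo (seen ++ [i]) rest

def f_alt (x : List Int) : Option Int := fGo [] x

-- ===== PRECONDITION & SPEC =====
def Spec_f (x : List Int) (out : Option Int) : Prop := out = f_alt x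
instance (x : List Int) (out : Option Int) : Decidable (Spec_f x out) := by unfold Spec_f; infer_instance

-- ===== CLAIM =====
def Claim_equal_f : Prop := ∀ (x : List Int), Dom_f x → Spec_f x (f x)

-- ===== LEMMAS AND PROOFS =====

-- A's fold function, with both branches written uniformly as insert i (getD i 0 + 1)
theorem fCount_eq (x : List Int) :
    fCount x = x.foldl (fun a i => a.insert i (a.getD i 0 + 1)) PySem.Dict.empty := by
  unfold fCount
  congr 1
  funext a i
  by_cases h : a.contains i = true
  · simp [h]
  · have hg : a.getD i 0 = 0 := by
      have : a.get? i = none := (PySem.Dict.get?_eq_none_iff_contains a i).2 (by simpa using h)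
      simp [PySem.Dict.getD, this]
    simp [h, hg]

theorem fScan_eq_find? (a : PySem.Dict Int Int) (ks : List Int) :
    fScan a ks = ks.find? (fun k => a.getD k 0 == 1) := by
  induction ks with
  | nil => rfl
  | cons k ks ih => cases h : (a.getD k 0 == 1) <;> simp [fScan, List.find?, ih, h]

-- find? over a Python-set accumulation: the or of the two find?s
theorem find?_setUpdate (p : Int → Bool) (l s : List Int) :
    List.find? p (PySem.Set.update s l) = (List.find? p s).or (List.find? p l) := by
  induction l generalizing s with
  | nil => simp [PySem.Set.update]
  | cons a t ih =>
    have hstep : PySem.Set.update s (a :: t) = PySem.Set.update (PySem.Set.add s a) t := by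
      simp [PySem.Set.update]
    rw [hstep, ih]
    by_cases h : PySem.Set.contains s a = true
    · have hmem : a ∈ s := by simpa [PySem.Set.contains] using h
      rw [show PySem.Set.add s a = s from by simp [PySem.Set.add, hmem]]
      cases hf : List.find? p s with
      | some v => simp
      | none =>
        have hpa : p a = false := by
          have := List.find?_eq_none.1 hf a hmem
          simpa using this
        simp [List.find?, hpa]
    · have hnot : a ∉ s := by simpa [PySem.Set.contains] using h
      rw [show PySem.Set.add s a = s ++ [a] from by simp [PySem.Set.add, hnot]]
      rw [List.find?_append, Option.or_assoc]
      congr 1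
      cases hpa : p a <;> simp [List.find?, hpa]

-- A's result is the first element of x whose count in x is 1
theorem f_eq_find (x : List Int) :
    f x = x.find? (fun i => x.count i == 1) := by
  unfold f
  rw [fScan_eq_find?, fCount_eq]
  rw [PySem.Dict.keys_foldl_insert]
  have hpred : (fun k => (List.foldl (fun a i => a.insert i (a.getD i 0 + 1)) (PySem.Dict.empty : PySem.Dict Int Int) x).getD k 0 == 1)
      = (fun i => x.count i == 1) := by
    funext k
    rw [PySem.Dict.getD_foldl_insert_add_one, PySem.Dict.getD_empty]
    by_cases h : x.count k = 1 <;> simp [h]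
  rw [hpred]
  have := find?_setUpdate (fun i => x.count i == 1) x (PySem.Dict.empty.keys (ν := Int))
  rw [PySem.Dict.keys_empty] at this
  simpa using this

-- B's loop invariant: fGo scanning l with prefix 'seen' finds the first element of l
-- whose count in seen ++ l is 1
theorem fGo_eq_find (seen l : List Int) :
    fGo seen l = l.find? (fun i => (seen ++ l).count i == 1) := by
  induction l generalizing seen with
  | nil => rfl
  | cons i rest ih =>
    have hcnt : (seen ++ i :: rest).count i = seen.count i + rest.count i + 1 := by
      simp [List.count_append]
      omega
    by_cases h : i ∉ seen ∧ i ∉ rest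
    · have h1 : (seen ++ i :: rest).count i = 1 := by
        rw [hcnt, List.count_eq_zero.2 h.1, List.count_eq_zero.2 h.2]
      simp [fGo, h, List.find?, h1]
    · have h1 : (seen ++ i :: rest).count i ≠ 1 := by
        rw [hcnt]
        rcases not_and_or.1 h with hm | hm
        · have := List.count_pos_iff.2 (not_not.1 hm); omega
        · have := List.count_pos_iff.2 (not_not.1 hm); omega
      have happ : (seen ++ [i]) ++ rest = seen ++ i :: rest := by simp
      rw [hcnt] at h1
      have hb : (List.count i seen + (List.count i rest + 1) == 1) = false := by
        simp only [beq_eq_false_iff_ne]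
        omega
      simp only [fGo, if_neg h, ih, happ]
      simp [List.find?, List.count_append, hb]

-- ===== VERDICT =====
theorem f_spec : Claim_equal_f := by
  intro x _
  unfold Spec_f f_alt
  rw [f_eq_find, fGo_eq_find]
  simp
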